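-- pv_equiv track=rewrite | github.com/schimmmi/n8n-workflow-builder | src/n8n_workflow_builder/templates/intent_extractor.py | _classify_purpose
-- ===== SOURCE A (Python) =====
-- from typing import Dict, List, Optional
--
-- def _classify_purpose(nodes: List[Dict]) -> str:
--     """Classify high-level purpose"""
--     node_types = [node.get("type", "").lower() for node in nodes]
--
--     # Classification logic
--     if any("schedule" in nt for nt in node_types):
--         return "Automated data synchronization"
--     elif any("webhook" in nt for nt in node_types):
--         return "Event-driven automation"
--     elif any("http" in nt or "api" in nt for nt in node_types):
--         return "API integration"
--     elif any("database" in nt or "postgres" in nt or "mysql" in nt for nt in node_types):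
--         return "Data management"
--     elif any("slack" in nt or "email" in nt or "notification" in nt for nt in node_types):
--         return "Communication automation"
--     else:
--         return "Data processing"
-- ===== SOURCE B (Python) =====
-- from typing import Dict, List, Optional
--
-- _RULES = [
--     (("schedule",), "Automated data synchronization"),
--     (("webhook",), "Event-driven automation"),
--     (("http", "api"), "API integration"),
--     (("database", "postgres", "mysql"), "Data management"),
--     (("slack", "email", "notification"), "Communication automation"),
-- ]
--
-- def _classify_purpose(nodes: List[Dict]) -> str:
--     """Classify high-level purpose"""
--     best = len(_RULES)
--     for node in nodes:
--         nt = node.get("type", "").lower()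
--         first = next(
--             (i for i, (keywords, _label) in enumerate(_RULES)
--              if any(k in nt for k in keywords)),
--             len(_RULES),
--         )
--         best = min(best, first)
--     return _RULES[best][1] if best < len(_RULES) else "Data processing"
-- ===== Notes on version B (the rewrite author's own statement) =====
-- stated objective: alternative
-- what changed: Replaces the five-tier if/elif cascade of any()-scans over node_types with a priority table and a single pass over the nodes that accumulates the minimum matching rule index, deciding the label only afterwards.
import Mathlib
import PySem

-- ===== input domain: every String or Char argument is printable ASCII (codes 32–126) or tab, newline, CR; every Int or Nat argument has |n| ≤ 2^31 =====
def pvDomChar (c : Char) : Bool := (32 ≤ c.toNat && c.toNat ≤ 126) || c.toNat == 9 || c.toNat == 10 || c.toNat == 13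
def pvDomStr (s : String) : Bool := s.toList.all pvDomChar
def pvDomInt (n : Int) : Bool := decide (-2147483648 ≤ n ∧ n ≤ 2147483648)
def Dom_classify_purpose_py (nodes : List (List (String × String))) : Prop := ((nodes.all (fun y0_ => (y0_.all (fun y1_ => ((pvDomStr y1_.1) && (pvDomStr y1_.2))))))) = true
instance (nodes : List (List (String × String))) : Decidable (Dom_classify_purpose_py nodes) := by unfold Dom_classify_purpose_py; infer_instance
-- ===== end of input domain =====

-- B replaces A's five-tier if/elif cascade of any()-scans by a priority rule table and one
-- accumulating pass over the nodes keeping the minimum matching rule index (objective: alternative).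

-- ===== PORT A =====
def classify_purpose_py (nodes : List (List (String × String))) : String :=
  let node_types := nodes.map (fun node => PySem.Str.lower ((PySem.Dict.ofList node).getD "type" ""))
  if node_types.any (fun nt => PySem.Str.isIn "schedule" nt) then "Automated data synchronization"
  else if node_types.any (fun nt => PySem.Str.isIn "webhook" nt) then "Event-driven automation"
  else if node_types.any (fun nt => PySem.Str.isIn "http" nt || PySem.Str.isIn "api" nt) then "API integration"
  else if node_types.any (fun nt => PySem.Str.isIn "database" nt || PySem.Str.isIn "postgres" nt || PySem.Str.isIn "mysql" nt) then "Data management"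
  else if node_types.any (fun nt => PySem.Str.isIn "slack" nt || PySem.Str.isIn "email" nt || PySem.Str.isIn "notification" nt) then "Communication automation"
  else "Data processing"

-- ===== PORT B =====
def pvRules : List (List String × String) :=
  [(["schedule"], "Automated data synchronization"),
   (["webhook"], "Event-driven automation"),
   (["http", "api"], "API integration"),
   (["database", "postgres", "mysql"], "Data management"),
   (["slack", "email", "notification"], "Communication automation")]

-- first = next((i for i, (keywords, _) in enumerate(_RULES) if any(k in nt for k in keywords)), len(_RULES))
def pvFirstRule (nt : String) : Nat :=
  match pvRules.findIdx? (fun r => r.1.any (fun k => PySem.Str.isIn k nt)) with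
  | some i => i
  | none => pvRules.length

def classify_purpose_py_alt (nodes : List (List (String × String))) : String :=
  let best := nodes.foldl
    (fun best node =>
      min best (pvFirstRule (PySem.Str.lower ((PySem.Dict.ofList node).getD "type" ""))))
    pvRules.length
  match pvRules[best]? with
  | some r => r.2
  | none => "Data processing"

-- ===== PRECONDITION & SPEC =====
def Spec_classify_purpose_py (nodes : List (List (String × String))) (out : String) : Prop := out = classify_purpose_py_alt nodes
instance (nodes : List (List (String × String))) (out : String) : Decidable (Spec_classify_purpose_py nodes out) := by unfold Spec_classify_purpose_py; infer_instance

-- ===== CLAIM (what is proved, stated in full; the proofs are below) =====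
def Claim_equal_classify_purpose_py : Prop := ∀ (nodes : List (List (String × String))), Dom_classify_purpose_py nodes → Spec_classify_purpose_py nodes (classify_purpose_py nodes)

-- ===== LEMMAS AND PROOFS =====

theorem pv_foldl_min_le_init (f : String → Nat) (l : List String) (b : Nat) :
    l.foldl (fun b y => min b (f y)) b ≤ b := by
  induction l generalizing b with
  | nil => simp
  | cons y ys ih => exact le_trans (ih (min b (f y))) (min_le_left _ _)

theorem pv_foldl_min_le_of_mem (f : String → Nat) (l : List String) (b : Nat) (x : String)
    (hx : x ∈ l) : l.foldl (fun b y => min b (f y)) b ≤ f x := by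
  induction l generalizing b with
  | nil => cases hx
  | cons y ys ih =>
    rcases List.mem_cons.mp hx with hx | hx
    · subst hx
      exact le_trans (pv_foldl_min_le_init f ys (min b (f x))) (min_le_right _ _)
    · exact ih _ hx

theorem pv_le_foldl_min (f : String → Nat) (l : List String) (b k : Nat)
    (hb : k ≤ b) (h : ∀ x ∈ l, k ≤ f x) : k ≤ l.foldl (fun b y => min b (f y)) b := by
  induction l generalizing b with
  | nil => simpa using hb
  | cons y ys ih =>
    exact ih _ (le_min hb (h y (List.mem_cons_self))) (fun x hx => h x (List.mem_cons_of_mem _ hx))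

theorem pv_firstRule_eq (nt : String) :
    pvFirstRule nt =
      if PySem.Str.isIn "schedule" nt then 0
      else if PySem.Str.isIn "webhook" nt then 1
      else if PySem.Str.isIn "http" nt || PySem.Str.isIn "api" nt then 2
      else if PySem.Str.isIn "database" nt || PySem.Str.isIn "postgres" nt || PySem.Str.isIn "mysql" nt then 3
      else if PySem.Str.isIn "slack" nt || PySem.Str.isIn "email" nt || PySem.Str.isIn "notification" nt then 4
      else 5 := by
  unfold pvFirstRule pvRules
  simp only [List.findIdx?_cons, List.findIdx?_nil, List.any_cons, List.any_nil, Bool.or_false]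
  split_ifs <;> simp_all

theorem pv_foldl_min_eq_cascade (nts : List String) :
    nts.foldl (fun b nt => min b (pvFirstRule nt)) 5 =
      (if nts.any (fun nt => PySem.Str.isIn "schedule" nt) then 0
       else if nts.any (fun nt => PySem.Str.isIn "webhook" nt) then 1
       else if nts.any (fun nt => PySem.Str.isIn "http" nt || PySem.Str.isIn "api" nt) then 2
       else if nts.any (fun nt => PySem.Str.isIn "database" nt || PySem.Str.isIn "postgres" nt || PySem.Str.isIn "mysql" nt) then 3
       else if nts.any (fun nt => PySem.Str.isIn "slack" nt || PySem.Str.isIn "email" nt || PySem.Str.isIn "notification" nt) then 4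
       else 5) := by
  split_ifs with h0 h1 h2 h3 h4
  · obtain ⟨x, hx, hp⟩ := List.any_eq_true.mp h0
    have hle := pv_foldl_min_le_of_mem pvFirstRule nts 5 x hx
    rw [pv_firstRule_eq, if_pos hp] at hle
    omega
  · obtain ⟨x, hx, hp⟩ := List.any_eq_true.mp h1
    have hle := pv_foldl_min_le_of_mem pvFirstRule nts 5 x hx
    have hge := pv_le_foldl_min pvFirstRule nts 5 1 (by norm_num) (fun y hy => by
      rw [pv_firstRule_eq]
      have := (List.any_eq_false.mp (Bool.eq_false_iff.mpr (fun hc => h0 hc)) ) y hy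
      split_ifs <;> simp_all)
    rw [pv_firstRule_eq] at hle
    have hnp0 : ¬ PySem.Str.isIn "schedule" x = true :=
      fun hc => h0 (List.any_eq_true.mpr ⟨x, hx, hc⟩)
    rw [if_neg hnp0, if_pos hp] at hle
    omega
  · obtain ⟨x, hx, hp⟩ := List.any_eq_true.mp h2
    have hle := pv_foldl_min_le_of_mem pvFirstRule nts 5 x hx
    have hge := pv_le_foldl_min pvFirstRule nts 5 2 (by norm_num) (fun y hy => by
      rw [pv_firstRule_eq]
      have c0 : ¬ PySem.Str.isIn "schedule" y = true := fun hc => h0 (List.any_eq_true.mpr ⟨y, hy, hc⟩)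
      have c1 : ¬ PySem.Str.isIn "webhook" y = true := fun hc => h1 (List.any_eq_true.mpr ⟨y, hy, hc⟩)
      split_ifs <;> simp_all)
    rw [pv_firstRule_eq] at hle
    have c0 : ¬ PySem.Str.isIn "schedule" x = true := fun hc => h0 (List.any_eq_true.mpr ⟨x, hx, hc⟩)
    have c1 : ¬ PySem.Str.isIn "webhook" x = true := fun hc => h1 (List.any_eq_true.mpr ⟨x, hx, hc⟩)
    rw [if_neg c0, if_neg c1, if_pos hp] at hle
    omega
  · obtain ⟨x, hx, hp⟩ := List.any_eq_true.mp h3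
    have hle := pv_foldl_min_le_of_mem pvFirstRule nts 5 x hx
    have hge := pv_le_foldl_min pvFirstRule nts 5 3 (by norm_num) (fun y hy => by
      rw [pv_firstRule_eq]
      have c0 : ¬ PySem.Str.isIn "schedule" y = true := fun hc => h0 (List.any_eq_true.mpr ⟨y, hy, hc⟩)
      have c1 : ¬ PySem.Str.isIn "webhook" y = true := fun hc => h1 (List.any_eq_true.mpr ⟨y, hy, hc⟩)
      have c2 : ¬ (PySem.Str.isIn "http" y || PySem.Str.isIn "api" y) = true := fun hc => h2 (List.any_eq_true.mpr ⟨y, hy, hc⟩)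
      split_ifs <;> simp_all)
    rw [pv_firstRule_eq] at hle
    have c0 : ¬ PySem.Str.isIn "schedule" x = true := fun hc => h0 (List.any_eq_true.mpr ⟨x, hx, hc⟩)
    have c1 : ¬ PySem.Str.isIn "webhook" x = true := fun hc => h1 (List.any_eq_true.mpr ⟨x, hx, hc⟩)
    have c2 : ¬ (PySem.Str.isIn "http" x || PySem.Str.isIn "api" x) = true := fun hc => h2 (List.any_eq_true.mpr ⟨x, hx, hc⟩)
    rw [if_neg c0, if_neg c1, if_neg c2, if_pos hp] at hle
    omega
  · obtain ⟨x, hx, hp⟩ := List.any_eq_true.mp h4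
    have hle := pv_foldl_min_le_of_mem pvFirstRule nts 5 x hx
    have hge := pv_le_foldl_min pvFirstRule nts 5 4 (by norm_num) (fun y hy => by
      rw [pv_firstRule_eq]
      have c0 : ¬ PySem.Str.isIn "schedule" y = true := fun hc => h0 (List.any_eq_true.mpr ⟨y, hy, hc⟩)
      have c1 : ¬ PySem.Str.isIn "webhook" y = true := fun hc => h1 (List.any_eq_true.mpr ⟨y, hy, hc⟩)
      have c2 : ¬ (PySem.Str.isIn "http" y || PySem.Str.isIn "api" y) = true := fun hc => h2 (List.any_eq_true.mpr ⟨y, hy, hc⟩)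
      have c3 : ¬ (PySem.Str.isIn "database" y || PySem.Str.isIn "postgres" y || PySem.Str.isIn "mysql" y) = true := fun hc => h3 (List.any_eq_true.mpr ⟨y, hy, hc⟩)
      split_ifs <;> simp_all)
    rw [pv_firstRule_eq] at hle
    have c0 : ¬ PySem.Str.isIn "schedule" x = true := fun hc => h0 (List.any_eq_true.mpr ⟨x, hx, hc⟩)
    have c1 : ¬ PySem.Str.isIn "webhook" x = true := fun hc => h1 (List.any_eq_true.mpr ⟨x, hx, hc⟩)
    have c2 : ¬ (PySem.Str.isIn "http" x || PySem.Str.isIn "api" x) = true := fun hc => h2 (List.any_eq_true.mpr ⟨x, hx, hc⟩)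
    have c3 : ¬ (PySem.Str.isIn "database" x || PySem.Str.isIn "postgres" x || PySem.Str.isIn "mysql" x) = true := fun hc => h3 (List.any_eq_true.mpr ⟨x, hx, hc⟩)
    rw [if_neg c0, if_neg c1, if_neg c2, if_neg c3, if_pos hp] at hle
    omega
  · have hge := pv_le_foldl_min pvFirstRule nts 5 5 (by norm_num) (fun y hy => by
      rw [pv_firstRule_eq]
      have c0 : ¬ PySem.Str.isIn "schedule" y = true := fun hc => h0 (List.any_eq_true.mpr ⟨y, hy, hc⟩)
      have c1 : ¬ PySem.Str.isIn "webhook" y = true := fun hc => h1 (List.any_eq_true.mpr ⟨y, hy, hc⟩)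
      have c2 : ¬ (PySem.Str.isIn "http" y || PySem.Str.isIn "api" y) = true := fun hc => h2 (List.any_eq_true.mpr ⟨y, hy, hc⟩)
      have c3 : ¬ (PySem.Str.isIn "database" y || PySem.Str.isIn "postgres" y || PySem.Str.isIn "mysql" y) = true := fun hc => h3 (List.any_eq_true.mpr ⟨y, hy, hc⟩)
      have c4 : ¬ (PySem.Str.isIn "slack" y || PySem.Str.isIn "email" y || PySem.Str.isIn "notification" y) = true := fun hc => h4 (List.any_eq_true.mpr ⟨y, hy, hc⟩)
      split_ifs
      simp_all)
    have hle := pv_foldl_min_le_init pvFirstRule nts 5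
    omega

-- ===== VERDICT (by name: the statement is the Claim_ definition above) =====
theorem classify_purpose_py_spec : Claim_equal_classify_purpose_py := by
  intro nodes _
  show classify_purpose_py nodes = classify_purpose_py_alt nodes
  unfold classify_purpose_py classify_purpose_py_alt
  have hfold : nodes.foldl
      (fun best node =>
        min best (pvFirstRule (PySem.Str.lower ((PySem.Dict.ofList node).getD "type" ""))))
      pvRules.length
      = (nodes.map (fun node => PySem.Str.lower ((PySem.Dict.ofList node).getD "type" ""))).foldl
          (fun b nt => min b (pvFirstRule nt)) 5 := by
    rw [List.foldl_map]
    rfl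
  simp only [hfold, pv_foldl_min_eq_cascade]
  split_ifs <;> rfl
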